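-- pv_equiv track=rewrite | github.com/tunggary/Algorithm | 코딩테스트/2022 상반기 LINE/5.py | solution
-- ===== SOURCE A (Python) =====
-- from heapq import heappop,heappush
--
-- def solution(abilities, k):
--
--   abilities.sort(reverse=True)
--   q = []
--   for i in range(0,len(abilities),2):
--     if i == len(abilities)-1:
--       heappush(q,(-abilities[i],abilities[i],abilities[i]))
--       break
--     heappush(q,(-(abilities[i]-abilities[i+1]),abilities[i],abilities[i+1]))
--   answer = 0
--
--   while q:
--     now = heappop(q)
--     if k > 0:
--       answer += now[1]
--       k -= 1
--     else:
--       answer += now[2]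
--   return answer
-- ===== SOURCE B (Python) =====
-- def solution(abilities, k):
--     abilities.sort(reverse=True)
--     base = 0
--     diffs = []
--     i = 0
--     n = len(abilities)
--     while i < n:
--         if i == n - 1:
--             base += abilities[i]
--         else:
--             base += abilities[i + 1]
--             diffs.append(abilities[i] - abilities[i + 1])
--         i += 2
--     diffs.sort(reverse=True)
--     return base + sum(diffs[:max(k, 0)])
-- ===== Notes on version B (the rewrite author's own statement) =====
-- stated objective: simpler
-- what changed: Replaces the heap of (-key, big, small) triples and the pop loop with one accumulation pass (sum of the smaller partner of each sorted pair) plus a descending sort of the pair gaps, returning base + sum of the top max(k,0) gaps.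
-- intended difference: On odd-length lists where fewer than k pair gaps of the descending sort exceed the minimum element while at least k gaps are positive, A wastes a pick on the leftover singleton (pushed with key -a instead of gap 0) and returns a smaller sum, while B returns the true maximum, which is the intended value. — e.g. on solution([5, 3, 2], 1): A returns 5, B returns 7
import Mathlib
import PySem

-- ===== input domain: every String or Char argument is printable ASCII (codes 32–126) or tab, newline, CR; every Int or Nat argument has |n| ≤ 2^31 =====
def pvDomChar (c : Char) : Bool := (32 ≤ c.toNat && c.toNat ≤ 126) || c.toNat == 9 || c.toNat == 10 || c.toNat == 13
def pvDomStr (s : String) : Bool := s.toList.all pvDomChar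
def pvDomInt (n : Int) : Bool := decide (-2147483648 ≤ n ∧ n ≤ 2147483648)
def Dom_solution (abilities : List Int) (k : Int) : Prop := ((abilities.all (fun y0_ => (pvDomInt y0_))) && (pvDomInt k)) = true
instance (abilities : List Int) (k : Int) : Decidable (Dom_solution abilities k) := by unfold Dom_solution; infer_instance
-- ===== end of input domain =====

-- B replaces A's priority queue of (-key, big, small) triples by one accumulation pass plus a
-- sort of the pair gaps; both A and B sort the caller's list in place (return value is what is
-- proved equal). On odd-length lists A can waste a pick on the leftover singleton (see D_ below).

-- ===== PORT A =====
-- Python tuple comparison (lexicographic ≤ on int triples), used by heapq.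
def lexLe (x y : Int × Int × Int) : Bool :=
  x.1 < y.1 || (x.1 == y.1 && (x.2.1 < y.2.1 || (x.2.1 == y.2.1 && x.2.2 ≤ y.2.2)))

-- heapq.heappush: the heap is modelled as an ascending-sorted list (exact: heappop always
-- returns the minimum tuple, and the triples are pure values, so the pop sequence is identical).
def heappush (q : List (Int × Int × Int)) (x : Int × Int × Int) : List (Int × Int × Int) :=
  match q with
  | [] => [x]
  | y :: ys => if lexLe x y then x :: y :: ys else y :: heappush ys x

-- A's `for i in range(0, len(abilities), 2)` push loop, two elements at a time.
def buildHeap (q : List (Int × Int × Int)) : List Int → List (Int × Int × Int)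
  | [] => q
  | [a] => heappush q (-a, a, a)
  | a :: b :: rest => buildHeap (heappush q (-(a - b), a, b)) rest

-- A's `while q` pop loop; heappop = take the head of the sorted list.
def popLoop (q : List (Int × Int × Int)) (k answer : Int) : Int :=
  match q with
  | [] => answer
  | now :: rest =>
      if k > 0 then popLoop rest (k - 1) (answer + now.2.1)
      else popLoop rest k (answer + now.2.2)

def solution (abilities : List Int) (k : Int) : Int :=
  popLoop (buildHeap [] (PySem.List.sorted abilities (fun x => x) true)) k 0

-- ===== PORT B =====
-- B's while loop: base accumulates the smaller partner (or the lone tail), diffs the pair gaps.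
def bLoop : List Int → Int → List Int → Int × List Int
  | [], base, diffs => (base, diffs)
  | [a], base, diffs => (base + a, diffs)
  | a :: b :: rest, base, diffs => bLoop rest (base + b) (diffs ++ [a - b])

def solution_alt (abilities : List Int) (k : Int) : Int :=
  let s := PySem.List.sorted abilities (fun x => x) true
  let r := bLoop s 0 []
  let ds := PySem.List.sorted r.2 (fun x => x) true
  r.1 + (ds.take (max k 0).toNat).sum

-- ===== PRECONDITION & SPEC =====
-- On odd-length lists where k is at most the number of sorted pairs, fewer than k pair gaps
-- exceed the minimum element, and at least k pair gaps are positive, A wastes a pick on the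
-- leftover singleton (pushed with key -a instead of gap 0) and returns a smaller sum; B returns
-- the true maximum, which is the intended value.  (gapCount ab c = how many of the pair gaps
-- of the descending sort of ab exceed c.)
def gapCount (ab : List Int) (c : Int) : Nat :=
  let s := PySem.List.sorted ab id true
  (List.range (ab.length / 2)).countP (fun i => decide (c < s.getD (2*i) 0 - s.getD (2*i+1) 0))

def D_solution (abilities : List Int) (k : Int) : Prop :=
  ¬ 2 ∣ abilities.length ∧
  gapCount abilities (abilities.min?.getD 0) < k.toNat ∧ k.toNat ≤ gapCount abilities 0

instance (abilities : List Int) (k : Int) : Decidable (D_solution abilities k) := by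
  unfold D_solution; infer_instance

def Spec_solution (abilities : List Int) (k : Int) (out : Int) : Prop := ¬ D_solution abilities k → out = solution_alt abilities k
instance (abilities : List Int) (k : Int) (out : Int) : Decidable (Spec_solution abilities k out) := by unfold Spec_solution; infer_instance

def pvDiffWitness_solution : List Int × Int := ([5, 3, 2], 1)
def pvDiffWitnessOut_solution : Int × Int := (5, 7)

-- ===== CLAIM (what is proved, stated in full; the proofs are below) =====
def Claim_unchanged_solution : Prop := ∀ (abilities : List Int) (k : Int), Dom_solution abilities k → Spec_solution abilities k (solution abilities k)
def Claim_changed_solution : Prop := Dom_solution (pvDiffWitness_solution.1) (pvDiffWitness_solution.2) ∧ D_solution (pvDiffWitness_solution.1) (pvDiffWitness_solution.2) ∧ solution (pvDiffWitness_solution.1) (pvDiffWitness_solution.2) = pvDiffWitnessOut_solution.1 ∧ solution_alt (pvDiffWitness_solution.1) (pvDiffWitness_solution.2) = pvDiffWitnessOut_solution.2 ∧ pvDiffWitnessOut_solution.1 ≠ pvDiffWitnessOut_solution.2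
def Claim_exact_solution : Prop := ∀ (abilities : List Int) (k : Int), Dom_solution abilities k → D_solution abilities k → solution abilities k ≠ solution_alt abilities k

-- ===== LEMMAS AND PROOFS =====

-- abbreviations used only by the proofs
-- gaps of consecutive disjoint pairs of a list
def pairGaps : List Int → List Int
  | [] => []
  | [_] => []
  | a :: b :: rest => (a - b) :: pairGaps rest

def dg (t : Int × Int × Int) : Int := t.2.1 - t.2.2
def sm (t : Int × Int × Int) : Int := t.2.2

-- the triples A pushes, in push order
def triples : List Int → List (Int × Int × Int)
  | [] => []
  | [a] => [(-a, a, a)]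
  | a :: b :: rest => (-(a - b), a, b) :: triples rest

-- the pair triples only (no tail singleton)
def pairTr : List Int → List (Int × Int × Int)
  | [] => []
  | [_] => []
  | a :: b :: rest => (-(a - b), a, b) :: pairTr rest

theorem lexLe_total (x y : Int × Int × Int) : lexLe x y = true ∨ lexLe y x = true := by
  obtain ⟨x1, x2, x3⟩ := x; obtain ⟨y1, y2, y3⟩ := y
  simp only [lexLe, Bool.or_eq_true, Bool.and_eq_true, decide_eq_true_eq, beq_iff_eq]
  omega

theorem lexLe_trans {x y z : Int × Int × Int} (h1 : lexLe x y = true) (h2 : lexLe y z = true) :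
    lexLe x z = true := by
  obtain ⟨x1, x2, x3⟩ := x; obtain ⟨y1, y2, y3⟩ := y; obtain ⟨z1, z2, z3⟩ := z
  simp only [lexLe, Bool.or_eq_true, Bool.and_eq_true, decide_eq_true_eq, beq_iff_eq] at *
  omega

theorem heappush_perm (q : List (Int × Int × Int)) (x : Int × Int × Int) :
    (heappush q x).Perm (x :: q) := by
  induction q with
  | nil => simp [heappush]
  | cons y ys ih =>
    simp only [heappush]
    split
    · exact List.Perm.refl _
    · exact (ih.cons y).trans (List.Perm.swap x y ys)

theorem heappush_pairwise {q : List (Int × Int × Int)} (x : Int × Int × Int)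
    (h : q.Pairwise (fun a b => lexLe a b = true)) :
    (heappush q x).Pairwise (fun a b => lexLe a b = true) := by
  induction q with
  | nil => simp [heappush]
  | cons y ys ih =>
    rw [List.pairwise_cons] at h
    obtain ⟨hy, hys⟩ := h
    simp only [heappush]
    split
    · rename_i hxy
      refine List.pairwise_cons.2 ⟨?_, List.pairwise_cons.2 ⟨hy, hys⟩⟩
      intro z hz
      rcases List.mem_cons.1 hz with rfl | hz'
      · exact hxy
      · exact lexLe_trans hxy (hy z hz')
    · rename_i hxy
      have hyx : lexLe y x = true := (lexLe_total x y).resolve_left hxy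
      refine List.pairwise_cons.2 ⟨?_, ih hys⟩
      intro z hz
      have hz2 : z ∈ x :: ys := (heappush_perm ys x).mem_iff.1 hz
      rcases List.mem_cons.1 hz2 with rfl | hz'
      · exact hyx
      · exact hy z hz'

theorem buildHeap_perm (l : List Int) : ∀ q : List (Int × Int × Int),
    (buildHeap q l).Perm (triples l ++ q) := by
  induction l using triples.induct with
  | case1 => intro q; simp [buildHeap, triples]
  | case2 a => intro q; simpa [buildHeap, triples] using heappush_perm q (-a, a, a)
  | case3 a b rest ih =>
    intro q
    simp only [buildHeap, triples]
    have h1 := ih (heappush q (-(a - b), a, b))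
    have h2 : (triples rest ++ heappush q (-(a - b), a, b)).Perm
        (triples rest ++ (-(a - b), a, b) :: q) :=
      (heappush_perm q (-(a - b), a, b)).append_left (triples rest)
    exact (h1.trans h2).trans List.perm_middle

theorem buildHeap_pairwise (l : List Int) : ∀ q : List (Int × Int × Int),
    q.Pairwise (fun a b => lexLe a b = true) →
    (buildHeap q l).Pairwise (fun a b => lexLe a b = true) := by
  induction l using triples.induct with
  | case1 => intro q h; exact h
  | case2 a => intro q h; exact heappush_pairwise _ h
  | case3 a b rest ih => intro q h; exact ih _ (heappush_pairwise _ h)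

theorem popLoop_eq (q : List (Int × Int × Int)) : ∀ (k answer : Int),
    popLoop q k answer =
      answer + (q.map sm).sum + (((q.map dg).take (max k 0).toNat)).sum := by
  induction q with
  | nil => intro k a; simp [popLoop]
  | cons now rest ih =>
    intro k a
    simp only [popLoop]
    split
    · rename_i hk
      have hmax : (max k 0).toNat = (max (k - 1) 0).toNat + 1 := by omega
      rw [ih (k - 1) (a + now.2.1)]
      simp only [List.map_cons, hmax, List.take_succ_cons, List.sum_cons]
      simp only [dg, sm]
      ring
    · rename_i hk
      have hmax : (max k 0).toNat = 0 := by omega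
      rw [ih k (a + now.2.2)]
      simp only [List.map_cons, hmax, List.take_zero, List.sum_nil, List.sum_cons]
      simp only [sm]
      ring

theorem bLoop_eq (s : List Int) : ∀ (base : Int) (diffs : List Int),
    bLoop s base diffs = (base + ((triples s).map sm).sum, diffs ++ pairGaps s) := by
  induction s using triples.induct with
  | case1 => intro b d; simp [bLoop, triples, pairGaps]
  | case2 a => intro b d; simp [bLoop, triples, pairGaps, sm]
  | case3 a c rest ih =>
    intro b d
    simp only [bLoop, triples, pairGaps, ih, List.map_cons, List.sum_cons, sm,
      Prod.mk.injEq]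
    constructor
    · ring
    · simp

-- pairGaps = dg-projection of pairTr
theorem map_dg_pairTr (s : List Int) : (pairTr s).map dg = pairGaps s := by
  induction s using triples.induct with
  | case1 => simp [pairTr, pairGaps]
  | case2 a => simp [pairTr, pairGaps]
  | case3 a b rest ih => simp [pairTr, pairGaps, dg, ih]

theorem triples_even {s : List Int} (h : s.length % 2 = 0) : triples s = pairTr s := by
  induction s using triples.induct with
  | case1 => simp [triples, pairTr]
  | case2 a => simp at h
  | case3 a b rest ih =>
    simp only [List.length_cons] at h
    simp [triples, pairTr, ih (by omega)]

theorem triples_odd {s : List Int} (h : s.length % 2 = 1) :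
    triples s = pairTr s ++ [(-(s.getLastD 0), s.getLastD 0, s.getLastD 0)] := by
  induction s using triples.induct with
  | case1 => simp at h
  | case2 a => simp [triples, pairTr]
  | case3 a b rest ih =>
    simp only [List.length_cons] at h
    have hr : rest.length % 2 = 1 := by omega
    have hne : rest ≠ [] := by
      intro he; rw [he] at hr; simp at hr
    have hlast : (a :: b :: rest).getLastD 0 = rest.getLastD 0 := by
      cases rest with
      | nil => exact absurd rfl hne
      | cons c t => simp
    rw [hlast]
    simp [triples, pairTr, ih hr]

-- every element of a descending list is ≥ its last element
theorem last_le_mem {s : List Int} (h : s.Pairwise (fun a b => b ≤ a)) :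
    ∀ y ∈ s, s.getLastD 0 ≤ y := by
  induction s with
  | nil => simp
  | cons a rest ih =>
    rw [List.pairwise_cons] at h
    obtain ⟨ha, hrest⟩ := h
    intro y hy
    cases rest with
    | nil => simp at hy; simp [hy]
    | cons b t =>
      rw [List.getLastD_cons]
      rcases List.mem_cons.1 hy with rfl | hy'
      · have := ih hrest b (by simp)
        calc (b :: t).getLastD 0 ≤ b := this
          _ ≤ y := ha b (by simp)
      · exact ih hrest y hy'

-- structural facts about the pair triples of a descending list bounded below by c
theorem pairTr_facts {s : List Int} (c : Int) (h : s.Pairwise (fun a b => b ≤ a))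
    (hc : ∀ y ∈ s, c ≤ y) :
    ∀ x ∈ pairTr s, x.1 = -(x.2.1 - x.2.2) ∧ x.2.2 ≤ x.2.1 ∧ c ≤ x.2.2 := by
  induction s using triples.induct with
  | case1 => simp [pairTr]
  | case2 a => simp [pairTr]
  | case3 a b rest ih =>
    intro x hx
    rw [List.pairwise_cons] at h
    obtain ⟨ha, h2⟩ := h
    rw [List.pairwise_cons] at h2
    obtain ⟨hb, hrest⟩ := h2
    rcases List.mem_cons.1 hx with rfl | hx'
    · refine ⟨by ring, ha b (by simp), hc b (by simp)⟩
    · exact ih hrest (fun y hy => hc y (by simp [hy])) x hx'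

-- first-occurrence split
theorem mem_split_first {α : Type} [DecidableEq α] {a : α} {l : List α} (h : a ∈ l) :
    ∃ u v, l = u ++ a :: v ∧ a ∉ u := by
  induction l with
  | nil => simp at h
  | cons b t ih =>
    by_cases hb : b = a
    · exact ⟨[], t, by simp [hb], by simp⟩
    · rcases List.mem_cons.1 h with rfl | h'
      · exact absurd rfl hb
      · obtain ⟨u, v, rfl, hnu⟩ := ih h'
        exact ⟨b :: u, v, by simp, by simp [hnu, Ne.symm hb]⟩

-- two descending Int lists that are permutations are equal
theorem eq_of_perm_desc {l1 l2 : List Int} (hp : l1.Perm l2)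
    (h1 : l1.Pairwise (fun a b => b ≤ a)) (h2 : l2.Pairwise (fun a b => b ≤ a)) :
    l1 = l2 := by
  exact hp.eq_of_sorted (fun a b _ _ hab hba => le_antisymm hba hab) h1 h2

-- a descending list splits at the count of elements > m
theorem desc_split_count {E : List Int} (m : Int) (h : E.Pairwise (fun a b => b ≤ a)) :
    (∀ x ∈ E.take (E.filter (fun d => decide (m < d))).length, m < x) ∧
    (∀ x ∈ E.drop (E.filter (fun d => decide (m < d))).length, x ≤ m) := by
  induction E with
  | nil => simp
  | cons e t ih =>
    rw [List.pairwise_cons] at h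
    obtain ⟨he, ht⟩ := h
    by_cases hm : m < e
    · have hf : (List.filter (fun d => decide (m < d)) (e :: t)).length
          = (List.filter (fun d => decide (m < d)) t).length + 1 := by
        simp [List.filter_cons, hm]
      rw [hf]
      obtain ⟨ih1, ih2⟩ := ih ht
      constructor
      · intro x hx
        rcases List.mem_cons.1 (by simpa [List.take_succ_cons] using hx) with rfl | hx'
        · exact hm
        · exact ih1 x hx'
      · intro x hx
        exact ih2 x (by simpa [List.drop_succ_cons] using hx)
    · have hzero : (List.filter (fun d => decide (m < d)) (e :: t)).length = 0 := by
        rw [List.length_eq_zero_iff, List.filter_eq_nil_iff]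
        intro x hx
        rcases List.mem_cons.1 hx with rfl | hx'
        · simpa using hm
        · have : x ≤ e := he x hx'
          simp; omega
      rw [hzero]
      constructor
      · simp
      · intro x hx
        simp only [List.drop_zero] at hx
        rcases List.mem_cons.1 hx with rfl | hx'
        · omega
        · have := he x hx'; omega


theorem lexLe_fst {a b : Int × Int × Int} (h : lexLe a b = true) : a.1 ≤ b.1 := by
  obtain ⟨a1, a2, a3⟩ := a; obtain ⟨b1, b2, b3⟩ := b
  simp only [lexLe, Bool.or_eq_true, Bool.and_eq_true, decide_eq_true_eq, beq_iff_eq] at h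
  omega

-- projection of a lex-sorted triple list with honest keys is a descending gap list
theorem proj_pairwise {Q : List (Int × Int × Int)}
    (hp : Q.Pairwise (fun a b => lexLe a b = true))
    (hk : ∀ x ∈ Q, x.1 = -(x.2.1 - x.2.2)) :
    (Q.map dg).Pairwise (fun a b => b ≤ a) := by
  rw [List.pairwise_map]
  refine hp.imp_of_mem ?_
  intro a b ha hb hab
  have h1 := lexLe_fst hab
  have h2 := hk a ha
  have h3 := hk b hb
  simp only [dg]
  omega

theorem gaps_nonneg {s : List Int} (hs : s.Pairwise (fun a b => b ≤ a)) :
    ∀ x ∈ pairGaps s, 0 ≤ x := by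
  induction s using triples.induct with
  | case1 => simp [pairGaps]
  | case2 a => simp [pairGaps]
  | case3 a b rest ih =>
    rw [List.pairwise_cons] at hs
    obtain ⟨ha, h2⟩ := hs
    rw [List.pairwise_cons] at h2
    obtain ⟨hb, hrest⟩ := h2
    intro x hx
    rcases List.mem_cons.1 hx with rfl | hx'
    · have := ha b (by simp); omega
    · exact ih hrest x hx'

-- the descending sort of the gaps of s
def Egaps (s : List Int) : List Int := PySem.List.sorted (pairGaps s) (fun x => x) true

theorem Egaps_perm (s : List Int) : (Egaps s).Perm (pairGaps s) :=
  PySem.List.sorted_perm _ _ _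

theorem Egaps_desc (s : List Int) : (Egaps s).Pairwise (fun a b => b ≤ a) := by
  have := PySem.List.sorted_pairwise_rev (xs := pairGaps s) (key := fun x => x)
  simpa using this

-- EVEN length: the gap projection of A's heap IS the descending sort of the gaps
theorem mapdg_even {s : List Int} (hs : s.Pairwise (fun a b => b ≤ a))
    (h : s.length % 2 = 0) :
    (buildHeap [] s).map dg = Egaps s := by
  have hperm : (buildHeap [] s).Perm (triples s) := by
    simpa using buildHeap_perm s []
  have hq : (buildHeap [] s).Pairwise (fun a b => lexLe a b = true) :=
    buildHeap_pairwise s [] (List.Pairwise.nil)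
  have htr : triples s = pairTr s := triples_even h
  have hkey : ∀ x ∈ buildHeap [] s, x.1 = -(x.2.1 - x.2.2) := by
    intro x hx
    have : x ∈ pairTr s := htr ▸ hperm.mem_iff.1 hx
    exact (pairTr_facts (s.getLastD 0) hs (last_le_mem hs) x this).1
  have h1 : ((buildHeap [] s).map dg).Pairwise (fun a b => b ≤ a) :=
    proj_pairwise hq hkey
  have h2 : ((buildHeap [] s).map dg).Perm (Egaps s) := by
    have : ((buildHeap [] s).map dg).Perm (pairGaps s) := by
      have := hperm.map dg
      rw [htr, map_dg_pairTr] at this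
      exact this
    exact this.trans (Egaps_perm s).symm
  exact eq_of_perm_desc h2 h1 (Egaps_desc s)

theorem aux_beforeTail {m x1 x2 x3 : Int} (hkey : x1 = -(x2 - x3)) (hle : x3 ≤ x2)
    (hm : m ≤ x3) (hlex : lexLe (x1, x2, x3) (-m, m, m) = true)
    (hne : (x1, x2, x3) ≠ ((-m : Int), (m : Int), (m : Int))) : m < x2 - x3 := by
  simp only [lexLe, Bool.or_eq_true, Bool.and_eq_true, decide_eq_true_eq, beq_iff_eq] at hlex
  have hne' : ¬(x1 = -m ∧ x2 = m ∧ x3 = m) := by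
    rintro ⟨h1, h2, h3⟩
    exact hne (by simp [h1, h2, h3])
  omega

theorem aux_afterTail {m x1 x2 x3 : Int} (hkey : x1 = -(x2 - x3))
    (hlex : lexLe (-m, m, m) (x1, x2, x3) = true) : x2 - x3 ≤ m := by
  simp only [lexLe, Bool.or_eq_true, Bool.and_eq_true, decide_eq_true_eq, beq_iff_eq] at hlex
  omega

-- ODD length: the gap projection of A's heap is the descending gap sort with an extra 0
-- wedged in after the gaps that exceed the minimum element
theorem mapdg_odd {s : List Int} (hs : s.Pairwise (fun a b => b ≤ a))
    (h : s.length % 2 = 1) :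
    (buildHeap [] s).map dg =
      (Egaps s).take (((pairGaps s).filter (fun d => decide (s.getLastD 0 < d))).length)
        ++ 0 :: (Egaps s).drop (((pairGaps s).filter (fun d => decide (s.getLastD 0 < d))).length) := by
  set m := s.getLastD 0 with hm
  set f : Int → Bool := fun d => decide (m < d) with hf
  set Q := buildHeap [] s with hQdef
  set tailT : Int × Int × Int := (-m, m, m) with htail
  have hperm : Q.Perm (triples s) := by simpa [hQdef] using buildHeap_perm s []
  have hq : Q.Pairwise (fun a b => lexLe a b = true) :=
    buildHeap_pairwise s [] (List.Pairwise.nil)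
  have htr : triples s = pairTr s ++ [tailT] := triples_odd h
  have hmem : tailT ∈ Q := hperm.mem_iff.2 (by rw [htr]; simp)
  obtain ⟨Q1, Q2, hsplit, hnotin⟩ := mem_split_first hmem
  -- Q1 ++ Q2 is a permutation of the pair triples
  have hrest : (Q1 ++ Q2).Perm (pairTr s) := by
    have h1 : (tailT :: (Q1 ++ Q2)).Perm (tailT :: pairTr s) := by
      have l1 : Q.Perm (tailT :: (Q1 ++ Q2)) := by
        rw [hsplit]; exact List.perm_middle
      have l2 : (triples s).Perm (tailT :: pairTr s) := by
        rw [htr]; exact List.perm_append_singleton _ _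
      exact l1.symm.trans (hperm.trans l2)
    exact h1.cons_inv
  have hmemP : ∀ x, x ∈ Q1 ++ Q2 → x ∈ pairTr s := fun x hx => hrest.mem_iff.1 hx
  have hfacts := pairTr_facts m hs (by rw [hm]; exact last_le_mem hs)
  -- pairwise structure of the split
  rw [hsplit] at hq
  rw [List.pairwise_append] at hq
  obtain ⟨hq1, hq2', hq12⟩ := hq
  rw [List.pairwise_cons] at hq2'
  obtain ⟨htail2, hq2⟩ := hq2'
  -- gap bounds on the two sides
  have hdg1 : ∀ x ∈ Q1, m < dg x := by
    intro x hx
    obtain ⟨hkey, hle, hlo⟩ := hfacts x (hmemP x (by simp [hx]))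
    have hlex : lexLe x tailT = true := hq12 x hx tailT (by simp)
    have hne : x ≠ tailT := fun he => hnotin (he ▸ hx)
    obtain ⟨x1, x2, x3⟩ := x
    exact aux_beforeTail hkey hle hlo hlex hne
  have hdg2 : ∀ x ∈ Q2, dg x ≤ m := by
    intro x hx
    obtain ⟨hkey, hle, hlo⟩ := hfacts x (hmemP x (by simp [hx]))
    have hlex : lexLe tailT x = true := htail2 x hx
    obtain ⟨x1, x2, x3⟩ := x
    exact aux_afterTail hkey hlex
  -- both projections are descending
  have hkey1 : ∀ x ∈ Q1, x.1 = -(x.2.1 - x.2.2) := fun x hx =>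
    (hfacts x (hmemP x (by simp [hx]))).1
  have hkey2 : ∀ x ∈ Q2, x.1 = -(x.2.1 - x.2.2) := fun x hx =>
    (hfacts x (hmemP x (by simp [hx]))).1
  have hd1 : (Q1.map dg).Pairwise (fun a b => b ≤ a) := proj_pairwise hq1 hkey1
  have hd2 : (Q2.map dg).Pairwise (fun a b => b ≤ a) := proj_pairwise hq2 hkey2
  -- permutation of the gap multisets
  have hgaps : (Q1.map dg ++ Q2.map dg).Perm (pairGaps s) := by
    have := hrest.map dg
    rw [map_dg_pairTr] at this
    simpa using this
  set t := ((pairGaps s).filter f).length with ht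
  have htE : t = ((Egaps s).filter f).length := by
    rw [ht]; exact (((Egaps_perm s).filter f).length_eq).symm
  have hsplitE := desc_split_count (E := Egaps s) m (Egaps_desc s)
  rw [← htE] at hsplitE
  obtain ⟨hEtake, hEdrop⟩ := hsplitE
  have htlen : t ≤ (Egaps s).length := by
    rw [htE]; exact List.length_filter_le _ _
  -- filter computations
  have hfilter1 : (Q1.map dg).filter f = Q1.map dg := by
    rw [List.filter_eq_self]
    intro x hx
    obtain ⟨y, hy, rfl⟩ := List.mem_map.1 hx
    simp [hf, hdg1 y hy]
  have hfilter2 : (Q2.map dg).filter f = [] := by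
    rw [List.filter_eq_nil_iff]
    intro x hx
    obtain ⟨y, hy, rfl⟩ := List.mem_map.1 hx
    simp [hf]
    have := hdg2 y hy
    omega
  have hEfilter1 : ((Egaps s).take t).filter f = (Egaps s).take t := by
    rw [List.filter_eq_self]
    intro x hx
    simp [hf, hEtake x hx]
  have hEfilter2 : ((Egaps s).drop t).filter f = [] := by
    rw [List.filter_eq_nil_iff]
    intro x hx
    simp [hf]
    have := hEdrop x hx
    omega
  -- the two > m parts are equal, hence the two ≤ m parts too
  have hEsplit : (Egaps s).take t ++ (Egaps s).drop t = Egaps s := List.take_append_drop _ _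
  have hpermfilter : ((Q1.map dg ++ Q2.map dg).filter f).Perm (((Egaps s).take t ++ (Egaps s).drop t).filter f) := by
    rw [hEsplit]
    exact (hgaps.trans (Egaps_perm s).symm).filter f
  rw [List.filter_append, List.filter_append, hfilter1, hfilter2, hEfilter1, hEfilter2,
    List.append_nil, List.append_nil] at hpermfilter
  have htake_pw : ((Egaps s).take t).Pairwise (fun a b => b ≤ a) :=
    List.Pairwise.sublist (List.take_sublist _ _) (Egaps_desc s)
  have hdrop_pw : ((Egaps s).drop t).Pairwise (fun a b => b ≤ a) :=
    List.Pairwise.sublist (List.drop_sublist _ _) (Egaps_desc s)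
  have heq1 : Q1.map dg = (Egaps s).take t := eq_of_perm_desc hpermfilter hd1 htake_pw
  have hperm2 : (Q2.map dg).Perm ((Egaps s).drop t) := by
    have hall : (Q1.map dg ++ Q2.map dg).Perm ((Egaps s).take t ++ (Egaps s).drop t) := by
      rw [hEsplit]; exact hgaps.trans (Egaps_perm s).symm
    rw [heq1] at hall
    exact (List.perm_append_left_iff _).1 hall
  have heq2 : Q2.map dg = (Egaps s).drop t := eq_of_perm_desc hperm2 hd2 hdrop_pw
  -- assemble
  rw [hsplit, List.map_append, List.map_cons, heq1, heq2]
  have : dg tailT = 0 := by simp [dg, htail]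
  rw [this]

-- sum of a take through the padded list (the heap wastes one pick on the 0)
theorem take_pad_sum {E : List Int} {t K : Nat} (h1 : t < K) (h2 : K ≤ E.length) :
    ((E.take t ++ 0 :: E.drop t).take K).sum = (E.take (K - 1)).sum := by
  have hlt : (E.take t).length = t := List.length_take_of_le (by omega)
  have hKt : K - t = (K - t - 1) + 1 := by omega
  rw [List.take_append, hlt, List.take_of_length_le (by omega), hKt, List.take_succ_cons,
    List.sum_append, List.sum_cons]
  have h3 : E.take (K - 1) = E.take t ++ (E.drop t).take (K - 1 - t) := by
    have e1 : t + (K - 1 - t) = K - 1 := by omega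
    rw [← e1, List.take_add]
    congr 2
    omega
  rw [h3, List.sum_append]
  have e2 : K - t - 1 = K - 1 - t := by omega
  rw [e2]
  ring

theorem sum_take_succ_getD {E : List Int} {n : Nat} (h : n < E.length) :
    (E.take (n + 1)).sum = (E.take n).sum + E.getD n 0 := by
  rw [List.take_succ, List.sum_append, List.getD_eq_getElem?_getD, List.getElem?_eq_getElem h]
  simp

-- index form of pairGaps
theorem pairGaps_as_range (s : List Int) :
    pairGaps s = (List.range (s.length / 2)).map
      (fun i => s.getD (2*i) 0 - s.getD (2*i+1) 0) := by
  induction s using triples.induct with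
  | case1 => simp [pairGaps]
  | case2 a => simp [pairGaps]
  | case3 a b rest ih =>
    have hlen : (a :: b :: rest).length / 2 = rest.length / 2 + 1 := by
      simp only [List.length_cons]; omega
    rw [pairGaps, hlen, List.range_succ_eq_map, List.map_cons, List.map_map, ih]
    congr 1

theorem gapCount_eq (ab : List Int) (c : Int) :
    gapCount ab c = (pairGaps (PySem.List.sorted ab (fun x => x) true)).countP
      (fun d => decide (c < d)) := by
  unfold gapCount
  dsimp only
  rw [pairGaps_as_range, List.countP_map, PySem.List.length_sorted]
  rfl

theorem min_eq_last (ab : List Int) (h : ab ≠ []) :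
    ab.min?.getD 0 = (PySem.List.sorted ab (fun x => x) true).getLastD 0 := by
  set s := PySem.List.sorted ab (fun x => x) true with hsdef
  have hs : s.Pairwise (fun a b => b ≤ a) := by
    have := PySem.List.sorted_pairwise_rev (xs := ab) (key := fun x => x)
    simpa [hsdef] using this
  have hperm : s.Perm ab := PySem.List.sorted_perm _ _ _
  have hne : s ≠ [] := by
    intro he
    exact h ((he ▸ hperm).symm.eq_nil)
  have hmemlast : s.getLastD 0 ∈ s := by
    match s, hne with
    | a :: t, _ =>
      rw [List.getLastD_cons]
      exact List.getLastD_mem_cons ..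
  have hmin : ab.min? = some (s.getLastD 0) := by
    rw [List.min?_eq_some_iff]
    exact ⟨hperm.mem_iff.1 hmemlast, fun b hb => last_le_mem hs b (hperm.mem_iff.2 hb)⟩
  rw [hmin]
  rfl

-- on a descending list, the (K-1)-th entry is positive iff at least K entries are positive
theorem getD_pos_iff {E : List Int} (hdesc : E.Pairwise (fun a b => b ≤ a)) {K : Nat}
    (h1 : 1 ≤ K) (h2 : K ≤ E.length) :
    (0 < E.getD (K - 1) 0) ↔ (K : Int) ≤ (E.countP (fun x => decide (0 < x)) : Int) := by
  obtain ⟨htake, hdrop⟩ := desc_split_count (E := E) 0 hdesc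
  have hcount : E.countP (fun x => decide ((0:Int) < x)) =
      (E.filter (fun d => decide ((0:Int) < d))).length := List.countP_eq_length_filter ..
  have ht0len : (E.filter (fun d => decide ((0:Int) < d))).length ≤ E.length :=
    List.length_filter_le _ _
  have hidx : K - 1 < E.length := by omega
  rw [List.getD_eq_getElem?_getD, List.getElem?_eq_getElem hidx, Option.getD_some, hcount]
  constructor
  · intro hp
    by_contra hlt
    have hKt : (E.filter (fun d => decide ((0:Int) < d))).length ≤ K - 1 := by omega
    have hmem : E[K-1] ∈ E.drop (E.filter (fun d => decide ((0:Int) < d))).length := by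
      have hd : K - 1 - (E.filter (fun d => decide ((0:Int) < d))).length <
          (E.drop (E.filter (fun d => decide ((0:Int) < d))).length).length := by
        rw [List.length_drop]; omega
      have he : (E.drop (E.filter (fun d => decide ((0:Int) < d))).length)[K - 1 -
          (E.filter (fun d => decide ((0:Int) < d))).length]'hd = E[K-1] := by
        rw [List.getElem_drop]
        congr 1
        omega
      rw [← he]
      exact List.getElem_mem _
    have := hdrop _ hmem
    omega
  · intro hK
    have hKt : K - 1 < (E.filter (fun d => decide ((0:Int) < d))).length := by omega
    have hmem : E[K-1] ∈ E.take (E.filter (fun d => decide ((0:Int) < d))).length := by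
      have hd : K - 1 < (E.take (E.filter (fun d => decide ((0:Int) < d))).length).length := by
        rw [List.length_take]; omega
      have he : (E.take (E.filter (fun d => decide ((0:Int) < d))).length)[K-1]'hd = E[K-1] :=
        List.getElem_take ..
      rw [← he]
      exact List.getElem_mem _
    have := htake _ hmem
    omega

-- the closed-form D_solution, re-expressed through the gap list of the sorted input
theorem D_iff (ab : List Int) (k : Int) :
    D_solution ab k ↔
      (ab.length % 2 = 1 ∧ 0 < k ∧
       k ≤ ((pairGaps (PySem.List.sorted ab (fun x => x) true)).length : Int) ∧
       ((((pairGaps (PySem.List.sorted ab (fun x => x) true)).filter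
           (fun d => decide ((PySem.List.sorted ab (fun x => x) true).getLastD 0 < d))).length : Int) < k) ∧
       0 < (Egaps (PySem.List.sorted ab (fun x => x) true)).getD (k - 1).toNat 0) := by
  unfold D_solution
  set s := PySem.List.sorted ab (fun x => x) true with hsdef
  have hlen : s.length = ab.length := PySem.List.length_sorted _ _ _
  have hplen : (pairGaps s).length = ab.length / 2 := by
    rw [pairGaps_as_range, List.length_map, List.length_range, hlen]
  have hEglen : (Egaps s).length = (pairGaps s).length := PySem.List.length_sorted _ _ _
  have hcntE : (Egaps s).countP (fun x => decide (0 < x)) =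
      (pairGaps s).countP (fun x => decide (0 < x)) := (Egaps_perm s).countP_eq _
  constructor
  · rintro ⟨h1, h4, h5⟩
    have h1' : ab.length % 2 = 1 := by omega
    have hne : ab ≠ [] := by
      intro he; rw [he] at h1'; simp at h1'
    rw [gapCount_eq, min_eq_last ab hne, ← hsdef, List.countP_eq_length_filter] at h4
    rw [gapCount_eq, ← hsdef] at h5
    have hcle : (pairGaps s).countP (fun d => decide (0 < d)) ≤ (pairGaps s).length :=
      List.countP_le_length ..
    have h2 : 0 < k := by omega
    refine ⟨h1', h2, by omega, by omega, ?_⟩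
    have hK1 : 1 ≤ k.toNat := by omega
    have hK2 : k.toNat ≤ (Egaps s).length := by omega
    have hiff := getD_pos_iff (Egaps_desc s) hK1 hK2
    have e : (k - 1).toNat = k.toNat - 1 := by omega
    rw [e]
    apply hiff.2
    omega
  · rintro ⟨h1, h2, h3, h4, h5⟩
    have hne : ab ≠ [] := by
      intro he; rw [he] at h1; simp at h1
    rw [gapCount_eq, min_eq_last ab hne, ← hsdef, List.countP_eq_length_filter]
    rw [gapCount_eq, ← hsdef]
    refine ⟨by omega, by omega, ?_⟩
    have hK1 : 1 ≤ k.toNat := by omega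
    have hK2 : k.toNat ≤ (Egaps s).length := by omega
    have hiff := getD_pos_iff (Egaps_desc s) hK1 hK2
    have e : (k - 1).toNat = k.toNat - 1 := by omega
    rw [e] at h5
    have := hiff.1 h5
    omega
-- common unfolding of both ports
theorem solution_eq (abilities : List Int) (k : Int) :
    solution abilities k =
      (((PySem.List.sorted abilities (fun x => x) true |> triples).map sm).sum) +
      ((((buildHeap [] (PySem.List.sorted abilities (fun x => x) true)).map dg).take (max k 0).toNat).sum) := by
  unfold solution
  rw [popLoop_eq]
  have hperm : (buildHeap [] (PySem.List.sorted abilities (fun x => x) true)).Perm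
      (triples (PySem.List.sorted abilities (fun x => x) true)) := by
    simpa using buildHeap_perm (PySem.List.sorted abilities (fun x => x) true) []
  rw [(hperm.map sm).sum_eq]
  ring

theorem solution_alt_eq (abilities : List Int) (k : Int) :
    solution_alt abilities k =
      (((PySem.List.sorted abilities (fun x => x) true |> triples).map sm).sum) +
      (((Egaps (PySem.List.sorted abilities (fun x => x) true)).take (max k 0).toNat).sum) := by
  unfold solution_alt
  dsimp only
  rw [bLoop_eq]
  simp [Egaps]

-- ===== VERDICT (by name: the statement is the Claim_ definition above) =====
theorem solution_spec : Claim_unchanged_solution := by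
  unfold Claim_unchanged_solution
  intro ab k _hdom
  unfold Spec_solution
  intro hnD
  rw [solution_eq, solution_alt_eq]
  set s := PySem.List.sorted ab (fun x => x) true with hsdef
  have hs : s.Pairwise (fun a b => b ≤ a) := by
    have := PySem.List.sorted_pairwise_rev (xs := ab) (key := fun x => x)
    simpa [hsdef] using this
  have hlen : s.length = ab.length := PySem.List.length_sorted _ _ _
  rcases Nat.even_or_odd ab.length with he | ho
  · -- even length: the projected heap IS the sorted gap list
    have : ab.length % 2 = 0 := Nat.even_iff.1 he
    rw [mapdg_even hs (by omega)]
  · -- odd length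
    have hodd : ab.length % 2 = 1 := Nat.odd_iff.1 ho
    rw [mapdg_odd hs (by omega)]
    set t := ((pairGaps s).filter (fun d => decide (s.getLastD 0 < d))).length with ht
    set K := (max k 0).toNat with hK
    set E := Egaps s with hE
    have hElen : E.length = (pairGaps s).length := PySem.List.length_sorted _ _ _
    have htlen : t ≤ E.length := by
      rw [hElen, ht]; exact List.length_filter_le _ _
    congr 1
    by_cases hk0 : k ≤ 0
    · have : K = 0 := by omega
      rw [this]; simp
    · push_neg at hk0
      have hKk : (K : Int) = k := by omega
      by_cases hkp : K ≤ E.length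
      swap
      · -- k beyond the number of gaps: both sides sum everything
        push_neg at hkp
        have hlen2 : (E.take t ++ 0 :: E.drop t).length = E.length + 1 := by
          rw [List.length_append, List.length_cons, List.length_take, List.length_drop]
          omega
        rw [List.take_of_length_le (show (E.take t ++ 0 :: E.drop t).length ≤ K by omega),
          List.take_of_length_le (show E.length ≤ K by omega),
          List.sum_append, List.sum_cons, ← List.sum_take_add_sum_drop E t]
        ring
      · by_cases hkt : K ≤ t
        · -- tail not yet popped: both take the same top gaps
          rw [List.take_append]
          have hlt : (E.take t).length = t := List.length_take_of_le htlen
          rw [hlt]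
          have : K - t = 0 := by omega
          rw [this]
          simp [List.take_take, Nat.min_eq_left hkt]
        · -- t < K ≤ |E|: A wastes a pick on the 0; ¬D forces the K-th gap to be 0
          push_neg at hkt
          have hgetD : E.getD (K - 1) 0 ≤ 0 := by
            by_contra hpos
            push_neg at hpos
            apply hnD
            rw [D_iff, ← hsdef]
            refine ⟨hodd, hk0, by omega, ?_, ?_⟩
            · rw [← ht]; omega
            · have e : (k - 1).toNat = K - 1 := by omega
              rw [e]
              exact hpos
          have hnonneg : 0 ≤ E.getD (K - 1) 0 := by
            have hKE : K - 1 < E.length := by omega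
            rw [List.getD_eq_getElem?_getD, List.getElem?_eq_getElem hKE]
            simp only [Option.getD_some]
            have hmem : E[K-1] ∈ E := List.getElem_mem _
            have hmem2 : E[K-1] ∈ pairGaps s := (Egaps_perm s).mem_iff.1 hmem
            exact gaps_nonneg hs _ hmem2
          have hz : E.getD (K - 1) 0 = 0 := le_antisymm hgetD hnonneg
          rw [take_pad_sum hkt hkp]
          have hK1 : K = (K - 1) + 1 := by omega
          rw [hK1, sum_take_succ_getD (by omega), hz]
          simp

theorem solution_changed : Claim_changed_solution := by
  unfold Claim_changed_solution; decide

theorem solution_tight : Claim_exact_solution := by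
  unfold Claim_exact_solution
  intro ab k _hdom hD
  rw [D_iff] at hD
  rw [solution_eq, solution_alt_eq]
  set s := PySem.List.sorted ab (fun x => x) true with hsdef
  obtain ⟨hodd, hk0, hkp, hkt, hpos⟩ := hD
  have hs : s.Pairwise (fun a b => b ≤ a) := by
    have := PySem.List.sorted_pairwise_rev (xs := ab) (key := fun x => x)
    simpa [hsdef] using this
  have hlen : s.length = ab.length := PySem.List.length_sorted _ _ _
  rw [mapdg_odd hs (by omega)]
  set t := ((pairGaps s).filter (fun d => decide (s.getLastD 0 < d))).length with ht
  set K := (max k 0).toNat with hK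
  set E := Egaps s with hE
  have hpos' : 0 < E.getD (k - 1).toNat 0 := hpos
  have hElen : E.length = (pairGaps s).length := PySem.List.length_sorted _ _ _
  have hKk : (K : Int) = k := by omega
  have hkp2 : K ≤ E.length := by omega
  have hkt2 : t < K := by omega
  have hpos2 : 0 < E.getD (K - 1) 0 := by
    have e : (k - 1).toNat = K - 1 := by omega
    rw [e] at hpos'
    exact hpos'
  have hR := sum_take_succ_getD (E := E) (n := K - 1) (by omega)
  have hK1 : K - 1 + 1 = K := by omega
  rw [hK1] at hR
  rw [take_pad_sum hkt2 hkp2, hR]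
  omega
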